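-- pv_equiv track=rewrite | github.com/YitingTsaii/Python-Based-Projects | 1-splay tree.py | insert_compare
-- ===== SOURCE A (Python) =====
-- def insert_compare(compare, num):
--     count = 0
--     for j in range(len(compare)-1, -1, -1):
--         if compare[j] > num:
--             break
--         else:
--             count = count + 1
--     for j in range(count):
--         compare.pop()
--     compare.append(num)
--     return compare
-- ===== SOURCE B (Python) =====
-- def insert_compare(compare, num):
--     keep = 0
--     for i, x in enumerate(compare):
--         if x > num:
--             keep = i + 1
--     del compare[keep:]
--     compare.append(num)
--     return compare
-- ===== Notes on version B (the rewrite author's own statement) =====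
-- stated objective: alternative
-- what changed: Instead of scanning backwards and popping trailing elements <= num, B scans FORWARD once recording the index just past the last element greater than num, then truncates the list at that index and appends num; no pops and no backward traversal.
import Mathlib
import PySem

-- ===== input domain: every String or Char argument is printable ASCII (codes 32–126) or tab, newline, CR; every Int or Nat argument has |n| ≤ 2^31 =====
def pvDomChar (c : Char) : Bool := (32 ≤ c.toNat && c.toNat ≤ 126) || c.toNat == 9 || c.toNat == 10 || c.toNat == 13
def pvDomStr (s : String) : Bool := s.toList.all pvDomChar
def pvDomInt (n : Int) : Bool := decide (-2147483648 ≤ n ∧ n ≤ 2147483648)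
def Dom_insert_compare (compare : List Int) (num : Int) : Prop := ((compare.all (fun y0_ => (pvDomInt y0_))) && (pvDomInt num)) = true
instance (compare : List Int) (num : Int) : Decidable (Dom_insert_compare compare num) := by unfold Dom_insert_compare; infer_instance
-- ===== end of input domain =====

-- B replaces A's backward count-then-pop with one FORWARD scan recording the index
-- just past the last element > num, then truncating there (alternative decomposition);
-- both mutate `compare` the same way in Python, the theorem is about the return value.

-- ===== PORT A =====
-- first loop of A: walk j over range(len(compare)-1, -1, -1), break on compare[j] > num,
-- else count one more (counting from the break point outward equals A's accumulator)
def pvCountLoop (compare : List Int) (num : Int) : List Int → Nat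
  | [] => 0
  | j :: rest =>
    if ((PySem.List.pyGet? compare j).getD 0) > num then 0
    else pvCountLoop compare num rest + 1

-- second loop of A: `for j in range(count): compare.pop()`
def pvPopLoop : Nat → List Int → List Int
  | 0, xs => xs
  | n + 1, xs => pvPopLoop n xs.dropLast

def insert_compare (compare : List Int) (num : Int) : List Int :=
  let count := pvCountLoop compare num
      (PySem.List.pyRange ((compare.length : Int) - 1) (-1) (-1))
  pvPopLoop count compare ++ [num]

-- ===== PORT B =====
-- `for i, x in enumerate(compare): if x > num: keep = i + 1`
def pvKeepGo (num : Int) (keep : Int) : List (Int × Int) → Int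
  | [] => keep
  | (i, x) :: rest => pvKeepGo num (if x > num then i + 1 else keep) rest

-- `del compare[keep:]` with 0 ≤ keep ≤ len(compare) truncates to the first keep elements
def insert_compare_alt (compare : List Int) (num : Int) : List Int :=
  let keep := pvKeepGo num 0 (PySem.List.enumerate compare)
  compare.take keep.toNat ++ [num]

-- ===== PRECONDITION & SPEC =====
def Spec_insert_compare (compare : List Int) (num : Int) (out : List Int) : Prop := out = insert_compare_alt compare num
instance (compare : List Int) (num : Int) (out : List Int) : Decidable (Spec_insert_compare compare num out) := by unfold Spec_insert_compare; infer_instance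

-- ===== CLAIM (what is proved, stated in full; the proofs are below) =====
def Claim_equal_insert_compare : Prop := ∀ (compare : List Int) (num : Int), Dom_insert_compare compare num → Spec_insert_compare compare num (insert_compare compare num)

-- ===== LEMMAS AND PROOFS =====

theorem pvCountLoop_snoc (xs : List Int) (x num : Int) :
    pvCountLoop (xs ++ [x]) num
      (PySem.List.pyRange (((xs ++ [x]).length : Int) - 1) (-1) (-1))
    = if x > num then 0
      else pvCountLoop xs num (PySem.List.pyRange ((xs.length : Int) - 1) (-1) (-1)) + 1 := by
  have hcons : PySem.List.pyRange (((xs ++ [x]).length : Int) - 1) (-1) (-1)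
      = ((xs.length : Int)) :: PySem.List.pyRange ((xs.length : Int) - 1) (-1) (-1) := by
    have h : (-1 : Int) < ((xs ++ [x]).length : Int) - 1 := by
      simp; omega
    rw [PySem.List.pyRange_neg_one_cons h]
    simp
  rw [hcons]
  have hget : (PySem.List.pyGet? (xs ++ [x]) (xs.length : Int)).getD 0 = x := by
    simp [PySem.List.pyGet?, PySem.List.pyIdx?]
  simp only [pvCountLoop, hget]
  split_ifs with hx
  · rfl
  · congr 1
    have key : ∀ (js : List Int), (∀ j ∈ js, 0 ≤ j ∧ j < (xs.length : Int)) →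
        pvCountLoop (xs ++ [x]) num js = pvCountLoop xs num js := by
      intro js
      induction js with
      | nil => intro _; rfl
      | cons j rest ih =>
        intro hmem
        obtain ⟨h0, hlt⟩ := hmem j (by simp)
        have hrest : ∀ j ∈ rest, 0 ≤ j ∧ j < (xs.length : Int) := fun j hj2 => hmem j (by simp [hj2])
        have h1 : j.toNat < xs.length := by omega
        have h2 : j < (xs.length : Int) + 1 := by omega
        have hgeq : (PySem.List.pyGet? (xs ++ [x]) j).getD 0 = (PySem.List.pyGet? xs j).getD 0 := by
          simp [PySem.List.pyGet?, PySem.List.pyIdx?, h0, hlt, h2,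
            List.getElem?_append_left h1]
        rw [pvCountLoop, pvCountLoop, hgeq, ih hrest]
    apply key
    intro j hj
    have := PySem.List.mem_pyRange_neg_one.mp hj
    omega

theorem pvPopLoop_snoc (n : Nat) (xs : List Int) (x : Int) :
    pvPopLoop (n + 1) (xs ++ [x]) = pvPopLoop n xs := by
  simp [pvPopLoop]

theorem pvKeepGo_append (num k : Int) (l1 l2 : List (Int × Int)) :
    pvKeepGo num k (l1 ++ l2) = pvKeepGo num (pvKeepGo num k l1) l2 := by
  induction l1 generalizing k with
  | nil => rfl
  | cons p rest ih => cases p; simp [pvKeepGo, ih]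

theorem pvKeep_snoc (num : Int) (xs : List Int) (x : Int) :
    pvKeepGo num 0 (PySem.List.enumerate (xs ++ [x]))
    = if x > num then (xs.length : Int) + 1 else pvKeepGo num 0 (PySem.List.enumerate xs) := by
  rw [PySem.List.enumerate_append, pvKeepGo_append]
  simp [pvKeepGo]

theorem pvKeep_bounds (num : Int) (xs : List Int) :
    0 ≤ pvKeepGo num 0 (PySem.List.enumerate xs)
      ∧ pvKeepGo num 0 (PySem.List.enumerate xs) ≤ (xs.length : Int) := by
  induction xs using List.reverseRecOn with
  | nil => simp [PySem.List.enumerate, pvKeepGo]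
  | append_singleton xs x ih =>
    rw [pvKeep_snoc]
    split_ifs with h
    · simp; omega
    · simp; omega

theorem insert_compare_eq_alt (compare : List Int) (num : Int) :
    insert_compare compare num = insert_compare_alt compare num := by
  induction compare using List.reverseRecOn with
  | nil =>
    simp [insert_compare, insert_compare_alt, pvCountLoop, pvPopLoop,
      PySem.List.pyRange_neg_one_eq_nil, PySem.List.enumerate, pvKeepGo]
  | append_singleton xs x ih =>
    simp only [insert_compare, insert_compare_alt] at ih ⊢
    rw [pvCountLoop_snoc, pvKeep_snoc]
    split_ifs with h1
    · -- x > num : keep everything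
      have hkeep : (((xs.length : Int) + 1)).toNat = (xs ++ [x]).length := by simp
      rw [hkeep, List.take_length]
      simp [pvPopLoop]
    · -- x ≤ num : drop x on both sides and use the induction hypothesis
      rw [pvPopLoop_snoc]
      have hb := pvKeep_bounds num xs
      have htk : (xs ++ [x]).take (pvKeepGo num 0 (PySem.List.enumerate xs)).toNat
          = xs.take (pvKeepGo num 0 (PySem.List.enumerate xs)).toNat := by
        apply List.take_append_of_le_length
        omega
      rw [htk]
      exact ih

-- ===== VERDICT (by name: the statement is the Claim_ definition above) =====
theorem insert_compare_spec : Claim_equal_insert_compare := by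
  intro compare num _
  unfold Spec_insert_compare
  exact insert_compare_eq_alt compare num
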